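-- pv_equiv track=rewrite | github.com/DoronF3/advent-of-code-2024 | advent_of_code_2024_9/main.py | identify_free_spaces
-- ===== SOURCE A (Python) =====
-- def identify_free_spaces(data):
--     """Identify contiguous free spaces in the input data."""
--     free_spaces = []
--     start = None
--
--     for i, ch in enumerate(data):
--         if ch == '.':
--             if start is None:
--                 start = i
--         elif start is not None:
--             free_spaces.append((start, i - start))
--             start = None
--
--     if start is not None:  # Add the last free space
--         free_spaces.append((start, len(data) - start))
--
--     return free_spaces
-- ===== SOURCE B (Python) =====
-- from itertools import groupby
--
--
-- def identify_free_spaces(data):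
--     """Identify contiguous free spaces in the input data."""
--     free_spaces = []
--     i = 0
--     for ch, group in groupby(data):
--         length = sum(1 for _ in group)
--         if ch == '.':
--             free_spaces.append((i, length))
--         i += length
--     return free_spaces
-- ===== Notes on version B (the rewrite author's own statement) =====
-- stated objective: idiomatic
-- what changed: Replaces the manual start/None state machine with itertools.groupby: partition the input into runs of equal elements, keep a running index, and emit (index, length) for each '.' run.
import Mathlib
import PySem

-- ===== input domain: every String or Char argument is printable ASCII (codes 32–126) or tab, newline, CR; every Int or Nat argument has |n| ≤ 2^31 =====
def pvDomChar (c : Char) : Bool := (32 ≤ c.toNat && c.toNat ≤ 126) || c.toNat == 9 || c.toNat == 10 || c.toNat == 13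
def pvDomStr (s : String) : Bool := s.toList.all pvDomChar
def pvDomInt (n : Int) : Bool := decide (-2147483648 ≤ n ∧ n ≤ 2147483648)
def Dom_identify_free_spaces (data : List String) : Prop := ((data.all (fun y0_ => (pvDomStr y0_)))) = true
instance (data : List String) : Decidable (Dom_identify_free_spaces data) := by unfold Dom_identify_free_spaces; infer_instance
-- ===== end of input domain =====

-- B replaces A's start/None state machine with a groupby-style run decomposition (same O(n) cost, more idiomatic).


-- ===== PORT A =====
-- the `for i, ch in enumerate(data)` loop; state: (free_spaces, start), index carried explicitly
def ifsLoopA : List String → Nat → Option Int → List (Int × Int) → List (Int × Int) × Option Int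
  | [], _, start, acc => (acc, start)
  | ch :: rest, i, start, acc =>
    if ch == "." then
      match start with
      | none => ifsLoopA rest (i + 1) (some (i : Int)) acc
      | some s => ifsLoopA rest (i + 1) (some s) acc
    else
      match start with
      | some s => ifsLoopA rest (i + 1) none (acc ++ [(s, (i : Int) - s)])
      | none => ifsLoopA rest (i + 1) none acc

def identify_free_spaces (data : List String) : List (Int × Int) :=
  let p := ifsLoopA data 0 none []
  match p.2 with
  | some s => p.1 ++ [(s, (data.length : Int) - s)]
  | none => p.1

-- ===== PORT B =====
-- itertools.groupby(data): list of (key, group) for maximal runs of equal elements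
def ifsGroupby : List String → List (String × List String)
  | [] => []
  | x :: xs =>
    (x, x :: xs.takeWhile (· == x)) :: ifsGroupby (xs.dropWhile (· == x))
termination_by l => l.length
decreasing_by
  have := List.length_dropWhile_le (· == x) xs
  simp only [List.length_cons]
  omega

-- the `for ch, group in groupby(data)` loop with running index i
def ifsRunsB : List (String × List String) → Int → List (Int × Int)
  | [], _ => []
  | (ch, g) :: rest, i =>
    let length : Int := g.foldl (fun n _ => n + 1) 0
    (if ch == "." then [(i, length)] else []) ++ ifsRunsB rest (i + length)

def identify_free_spaces_alt (data : List String) : List (Int × Int) :=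
  ifsRunsB (ifsGroupby data) 0

-- ===== PRECONDITION & SPEC =====
def Spec_identify_free_spaces (data : List String) (out : List (Int × Int)) : Prop := out = identify_free_spaces_alt data
instance (data : List String) (out : List (Int × Int)) : Decidable (Spec_identify_free_spaces data out) := by unfold Spec_identify_free_spaces; infer_instance

-- ===== CLAIM (what is proved, stated in full; the proofs are below) =====
def Claim_equal_identify_free_spaces : Prop := ∀ (data : List String), Dom_identify_free_spaces data → Spec_identify_free_spaces data (identify_free_spaces data)

-- ===== LEMMAS AND PROOFS =====

theorem ifsGroupby_nil : ifsGroupby [] = [] := by rw [ifsGroupby.eq_def]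

-- finalization step of A, at absolute end index N
def ifsAfter (p : List (Int × Int) × Option Int) (N : Int) : List (Int × Int) :=
  match p.2 with
  | some s => p.1 ++ [(s, N - s)]
  | none => p.1

theorem ifsRunsB_len (g : List String) :
    g.foldl (fun (n : Int) _ => n + 1) 0 = (g.length : Int) := by
  suffices h : ∀ (a : Int), g.foldl (fun n _ => n + 1) a = a + g.length by
    simpa using h 0
  induction g with
  | nil => intro a; simp
  | cons x xs ih => intro a; simp [List.foldl, ih]; ring

-- a run of dots with start already set: state unchanged, index advances
theorem ifsLoopA_dots (run : List String) (h : ∀ y ∈ run, y == ".") :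
    ∀ (t : List String) (j : Nat) (s : Int) (acc : List (Int × Int)),
      ifsLoopA (run ++ t) j (some s) acc = ifsLoopA t (j + run.length) (some s) acc := by
  induction run with
  | nil => intro t j s acc; simp
  | cons x xs ih =>
    intro t j s acc
    have hx : x == "." := h x (by simp)
    have hxs : ∀ y ∈ xs, y == "." := fun y hy => h y (by simp [hy])
    simp only [List.cons_append, ifsLoopA, hx, if_pos]
    rw [ih hxs]
    have hl : j + (x :: xs).length = j + 1 + xs.length := by simp [List.length_cons]; omega
    rw [hl]

-- a run of non-dots with start = none: state unchanged, index advances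
theorem ifsLoopA_nondots (run : List String) (h : ∀ y ∈ run, ¬ (y == ".")) :
    ∀ (t : List String) (j : Nat) (acc : List (Int × Int)),
      ifsLoopA (run ++ t) j none acc = ifsLoopA t (j + run.length) none acc := by
  induction run with
  | nil => intro t j acc; simp
  | cons x xs ih =>
    intro t j acc
    have hx : ¬ (x == ".") := h x (by simp)
    have hxs : ∀ y ∈ xs, ¬ (y == ".") := fun y hy => h y (by simp [hy])
    simp only [List.cons_append, ifsLoopA, hx, if_neg, Bool.not_eq_true]
    rw [ih hxs]
    have hl : j + (x :: xs).length = j + 1 + xs.length := by simp [List.length_cons]; omega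
    rw [hl]

-- closing a pending free run: if the next element (if any) is not '.', carrying
-- (some s) is the same as appending (s, j - s) now and carrying none
theorem ifsLoopA_close (rest : List String) (j : Nat) (s : Int) (acc : List (Int × Int)) (N : Int)
    (hN : rest = [] → N = (j : Int))
    (hhd : ∀ h ∈ rest.head?, ¬ (h == ".")) :
    ifsAfter (ifsLoopA rest j (some s) acc) N =
    ifsAfter (ifsLoopA rest j none (acc ++ [(s, (j : Int) - s)])) N := by
  cases rest with
  | nil => simp [ifsLoopA, ifsAfter, hN rfl]
  | cons h t =>
    have hh : ¬ (h == ".") := hhd h (by simp)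
    simp [ifsLoopA, hh]

theorem ifs_main : ∀ (n : Nat) (data : List String), data.length ≤ n →
    ∀ (j : Nat) (acc : List (Int × Int)),
      ifsAfter (ifsLoopA data j none acc) ((j : Int) + data.length) =
      acc ++ ifsRunsB (ifsGroupby data) j := by
  intro n
  induction n with
  | zero =>
    intro data hlen j acc
    have : data = [] := List.eq_nil_of_length_eq_zero (Nat.le_zero.mp hlen)
    subst this
    simp [ifsLoopA, ifsAfter, ifsGroupby_nil, ifsRunsB]
  | succ n ih =>
    intro data hlen j acc
    cases data with
    | nil => simp [ifsLoopA, ifsAfter, ifsGroupby_nil, ifsRunsB]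
    | cons x xs =>
      set run := xs.takeWhile (· == x) with hrun
      set rest := xs.dropWhile (· == x) with hrest
      have hsplit : xs = run ++ rest := (List.takeWhile_append_dropWhile).symm
      have hrunx : ∀ y ∈ run, y == x := by
        intro y hy
        exact List.mem_takeWhile_imp (p := (· == x)) (l := xs) hy
      have hrestlen : rest.length ≤ n := by
        have h1 : rest.length ≤ xs.length := List.length_dropWhile_le _ _
        simp only [List.length_cons] at hlen
        omega
      have hlens : (x :: xs).length = run.length + 1 + rest.length := by
        rw [hsplit]; simp; omega
      have hgb : ifsGroupby (x :: xs) = (x, x :: run) :: ifsGroupby rest := by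
        rw [ifsGroupby.eq_def]
      have hhd : ∀ h ∈ rest.head?, ¬ (h == x) := by
        intro h hh
        cases hr : rest with
        | nil => simp [hr] at hh
        | cons a t =>
          simp [hr] at hh
          subst hh
          have := List.dropWhile_get_zero_not (p := (· == x)) (l := xs)
            (by rw [← hrest, hr]; simp)
          simpa [← hrest, hr] using this
      by_cases hx : x == "."
      · have hx' : x = "." := by simpa using hx
        subst hx'
        have hrundot : ∀ y ∈ run, y == "." := hrunx
        have hresthd : ∀ h ∈ rest.head?, ¬ (h == ".") := hhd
        have step1 : ifsLoopA ("." :: xs) j none acc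
            = ifsLoopA rest (j + 1 + run.length) (some (j : Int)) acc := by
          have h0 : ifsLoopA ("." :: xs) j none acc = ifsLoopA xs (j + 1) (some (j : Int)) acc := by
            simp [ifsLoopA]
          rw [h0, hsplit, ifsLoopA_dots run hrundot rest (j + 1) (j : Int) acc]
        rw [step1]
        have hNe : rest = [] → ((j : Int) + (("." :: xs).length : Int)) = ((j + 1 + run.length : Nat) : Int) := by
          intro hr; rw [hlens, hr]; push_cast [List.length_nil]; ring
        rw [ifsLoopA_close rest (j + 1 + run.length) (j : Int) acc _ hNe hresthd]
        have := ih rest hrestlen (j + 1 + run.length) (acc ++ [((j : Int), ((j + 1 + run.length : Nat) : Int) - j)])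
        have hNeq : ((j + 1 + run.length : Nat) : Int) + (rest.length : Int) = (j : Int) + (("." :: xs).length : Int) := by
          rw [hlens]; push_cast; ring
        rw [← hNeq]
        rw [this]
        rw [hgb]
        simp only [ifsRunsB, if_pos (by rfl : ("." : String) == "."), ifsRunsB_len]
        simp only [List.append_assoc, List.singleton_append, List.length_cons]
        congr 2
        · push_cast; ring
        · congr 1; push_cast; ring
      · have hrunnd : ∀ y ∈ run, ¬ (y == ".") := by
          intro y hy
          have : y = x := by simpa using hrunx y hy
          subst this; exact hx
        have step1 : ifsLoopA (x :: xs) j none acc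
            = ifsLoopA rest (j + 1 + run.length) none acc := by
          have h0 : ifsLoopA (x :: xs) j none acc = ifsLoopA xs (j + 1) none acc := by
            simp [ifsLoopA, hx]
          rw [h0, hsplit, ifsLoopA_nondots run hrunnd rest (j + 1) acc]
        rw [step1]
        have hNeq : ((j + 1 + run.length : Nat) : Int) + (rest.length : Int) = (j : Int) + ((x :: xs).length : Int) := by
          rw [hlens]; push_cast; ring
        rw [← hNeq, ih rest hrestlen (j + 1 + run.length) acc, hgb]
        simp only [ifsRunsB, if_neg hx, ifsRunsB_len, List.nil_append, List.length_cons]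
        congr 2
        push_cast; ring

-- ===== VERDICT (by name: the statement is the Claim_ definition above) =====
theorem identify_free_spaces_spec : Claim_equal_identify_free_spaces := by
  intro data _
  unfold Spec_identify_free_spaces identify_free_spaces identify_free_spaces_alt
  have h := ifs_main data.length data le_rfl 0 []
  simpa [ifsAfter] using h
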